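-- pv_equiv track=rewrite | github.com/curly-journey/LearningPython | wordMatcher.py | trimDict
-- ===== SOURCE A (Python) =====
-- def trimDict(dictionary,wordList):
--     newDict = []
--     for x in dictionary:
--         for y in wordList:
--             if strContains(x,y):
--                 newDict.append(x.strip())
--                 break
--     return newDict
--
-- def strContains(str1, str2):
--     longStr = str1.lower()
--     shortStr = str2.lower()
--     longLen = len(longStr)
--     shortLen = len(shortStr)
--     if shortLen > longLen:
--         longStr = shortStr
--         shortStr = str1.lower()
--         longLen = shortLen
--         shortLen = len(shortStr)
--     elif len(shortStr) == len(longStr):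
--         if shortStr == longStr:
--             return True
--         else:
--             return False
--
--     # At this point, we want to check the start and end of longStr
--     # number of characters to check is shortLen.
--     startStr = longStr[0:shortLen]
--     endStr = longStr[longLen-shortLen : longLen]
--     if startStr == shortStr or endStr == shortStr:
--         return True
--     else:
--         return False
-- ===== SOURCE B (Python) =====
-- def trimDict(dictionary, wordList):
--     # Index pass: collect every prefix and suffix of every lowercased wordlist word
--     # into one hash set, and the lowercased words themselves into another.
--     affixes = set()
--     words = set()
--     for w in wordList:
--         lw = w.lower()
--         words.add(lw)
--         for i in range(len(lw) + 1):
--             affixes.add(lw[:i])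
--             affixes.add(lw[i:])
--     # Query pass: x matches some wordlist word iff its lowercase form is itself an
--     # affix of a wordlist word, or one of its own prefixes/suffixes is a wordlist word.
--     newDict = []
--     for x in dictionary:
--         lx = x.lower()
--         if lx in affixes or any(lx[:i] in words or lx[i:] in words for i in range(len(lx) + 1)):
--             newDict.append(x.strip())
--     return newDict
-- ===== Notes on version B (the rewrite author's own statement) =====
-- stated objective: faster
-- what changed: Replaces A's nested dictionary-times-wordlist scan with a hash index built once: a set of all prefixes/suffixes of the lowercased wordlist words plus a set of the words themselves, so each dictionary word is decided by set lookups on its own affixes and the inner scan over wordList disappears.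
import Mathlib
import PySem

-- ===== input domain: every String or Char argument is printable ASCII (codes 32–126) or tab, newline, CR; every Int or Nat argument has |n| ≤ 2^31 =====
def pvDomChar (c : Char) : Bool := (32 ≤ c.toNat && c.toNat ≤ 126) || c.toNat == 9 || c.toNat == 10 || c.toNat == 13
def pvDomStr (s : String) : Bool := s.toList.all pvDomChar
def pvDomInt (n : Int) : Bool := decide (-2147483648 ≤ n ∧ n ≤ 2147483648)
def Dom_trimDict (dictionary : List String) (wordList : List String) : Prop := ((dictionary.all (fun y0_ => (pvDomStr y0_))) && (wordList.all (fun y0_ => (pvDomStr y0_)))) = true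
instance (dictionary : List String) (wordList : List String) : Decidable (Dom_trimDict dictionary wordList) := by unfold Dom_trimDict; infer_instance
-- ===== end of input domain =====

-- B replaces A's nested dictionary×wordList scan with a hash index built once (all
-- prefixes/suffixes of the lowercased wordlist words, plus the words themselves), so each
-- dictionary word is decided by set lookups on its own affixes (objective: faster).

-- ===== PORT A =====
-- the common tail of strContains after the swap: compare start/end slices with the short string
def strContainsTail (longStr shortStr : String) (longLen shortLen : Int) : Bool :=
  let startStr := PySem.Str.slice longStr (some 0) (some shortLen)
  let endStr := PySem.Str.slice longStr (some (longLen - shortLen)) (some longLen)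
  startStr == shortStr || endStr == shortStr

def strContains (str1 str2 : String) : Bool :=
  let longStr := PySem.Str.lower str1
  let shortStr := PySem.Str.lower str2
  let longLen := PySem.Str.len longStr
  let shortLen := PySem.Str.len shortStr
  if shortLen > longLen then
    -- swap branch: longStr := shortStr, shortStr := str1.lower(), then the common tail
    strContainsTail shortStr (PySem.Str.lower str1) shortLen (PySem.Str.len (PySem.Str.lower str1))
  else if shortLen = longLen then
    shortStr == longStr
  else
    strContainsTail longStr shortStr longLen shortLen

-- inner 'for y in wordList: if strContains(x,y): append; break'
def trimDictInner (x : String) (acc : List String) : List String → List String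
  | [] => acc
  | y :: ys => if strContains x y then acc ++ [PySem.Str.strip x] else trimDictInner x acc ys

def trimDict (dictionary : List String) (wordList : List String) : List String :=
  dictionary.foldl (fun newDict x => trimDictInner x newDict wordList) []

-- ===== PORT B =====
-- inner 'for i in range(len(lw)+1): affixes.add(lw[:i]); affixes.add(lw[i:])' (lw = w.lower())
def affixAdd (a : PySem.Set String) (w : String) : PySem.Set String :=
  (PySem.List.pyRange 0 (PySem.Str.len (PySem.Str.lower w) + 1)).foldl
    (fun a i => PySem.Set.add (PySem.Set.add a (PySem.Str.slice (PySem.Str.lower w) none (some i)))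
                              (PySem.Str.slice (PySem.Str.lower w) (some i) none)) a

def trimDict_alt (dictionary : List String) (wordList : List String) : List String :=
  -- index pass: one loop over wordList with the two set accumulators (affixes, words)
  let aw := wordList.foldl
    (fun (p : PySem.Set String × PySem.Set String) w =>
      (affixAdd p.1 w, PySem.Set.add p.2 (PySem.Str.lower w)))
    (PySem.Set.empty, PySem.Set.empty)
  -- query pass over the dictionary: set lookups only, no scan of wordList
  dictionary.foldl (fun newDict x =>
    let lx := PySem.Str.lower x
    if PySem.Set.contains aw.1 lx ||
       (PySem.List.pyRange 0 (PySem.Str.len lx + 1)).any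
         (fun i => PySem.Set.contains aw.2 (PySem.Str.slice lx none (some i)) ||
                   PySem.Set.contains aw.2 (PySem.Str.slice lx (some i) none))
    then newDict ++ [PySem.Str.strip x] else newDict) []

-- ===== PRECONDITION & SPEC =====
def Spec_trimDict (dictionary : List String) (wordList : List String) (out : List String) : Prop := out = trimDict_alt dictionary wordList
instance (dictionary : List String) (wordList : List String) (out : List String) : Decidable (Spec_trimDict dictionary wordList out) := by unfold Spec_trimDict; infer_instance

-- ===== CLAIM (what is proved, stated in full; the proofs are below) =====
def Claim_equal_trimDict : Prop := ∀ (dictionary : List String) (wordList : List String), Dom_trimDict dictionary wordList → Spec_trimDict dictionary wordList (trimDict dictionary wordList)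

-- ===== LEMMAS AND PROOFS =====

theorem str_beq_toList (a b : String) : (a == b) = (a.toList == b.toList) := by
  rw [Bool.eq_iff_iff]
  simp [String.toList_inj]

-- A's helper tail characterised: prefix-or-suffix of the longer string
theorem tail_iff (L S : String) (h : S.toList.length ≤ L.toList.length) :
    strContainsTail L S (L.toList.length : Int) (S.toList.length : Int)
      = (decide (S.toList <+: L.toList) || decide (S.toList <:+ L.toList)) := by
  unfold strContainsTail
  simp only [str_beq_toList, PySem.Str.toList_slice, PySem.Chars.slice_eq_listSlice]
  rw [Bool.eq_iff_iff]
  set a := L.toList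
  set b := S.toList
  have h1 : PySem.List.slice a (some 0) (some (b.length : Int)) = a.take b.length := by
    rw [PySem.List.slice_zero_start, PySem.List.slice_to_natCast]
  have h2 : ((a.length : Int) - b.length) = ((a.length - b.length : Nat) : Int) := by omega
  have h3 : PySem.List.slice a (some ((a.length : Int) - b.length)) (some (a.length : Int))
      = a.drop (a.length - b.length) := by
    rw [h2, PySem.List.slice_natCast]
    have : a.length - (a.length - b.length) = b.length := by omega
    rw [this]
    exact List.take_of_length_le (by simp; omega)
  rw [h1, h3]
  simp only [Bool.or_eq_true, beq_iff_eq, decide_eq_true_eq]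
  rw [List.prefix_iff_eq_take, List.suffix_iff_eq_drop]
  constructor
  · rintro (h' | h') <;> [left; right] <;> exact h'.symm
  · rintro (h' | h') <;> [left; right] <;> exact h'.symm

-- A's helper characterised: symmetric prefix/suffix match on the lowercased strings
theorem strContains_iff (x y : String) :
    strContains x y = true ↔
      ((PySem.Str.lower y).toList <+: (PySem.Str.lower x).toList ∨
       (PySem.Str.lower y).toList <:+ (PySem.Str.lower x).toList ∨
       (PySem.Str.lower x).toList <+: (PySem.Str.lower y).toList ∨
       (PySem.Str.lower x).toList <:+ (PySem.Str.lower y).toList) := by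
  unfold strContains
  set sx := PySem.Str.lower x with hsx
  set sy := PySem.Str.lower y with hsy
  simp only [PySem.Str.len_eq]
  rcases lt_trichotomy sx.toList.length sy.toList.length with hlt | heq | hgt
  · rw [if_pos (by exact_mod_cast hlt)]
    rw [tail_iff sy sx (le_of_lt hlt)]
    have hp : ¬ (sy.toList <+: sx.toList) := fun hc => by have := hc.length_le; omega
    have hs : ¬ (sy.toList <:+ sx.toList) := fun hc => by have := hc.length_le; omega
    simp only [Bool.or_eq_true, decide_eq_true_eq]
    constructor
    · rintro (h | h)
      exacts [Or.inr (Or.inr (Or.inl h)), Or.inr (Or.inr (Or.inr h))]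
    · rintro (h | h | h | h)
      exacts [absurd h hp, absurd h hs, Or.inl h, Or.inr h]
  · rw [if_neg (by omega), if_pos (by exact_mod_cast heq.symm)]
    rw [str_beq_toList]
    simp only [beq_iff_eq]
    constructor
    · intro h; exact Or.inl (h ▸ List.prefix_refl _)
    · rintro (h | h | h | h)
      · exact h.eq_of_length (by omega)
      · exact h.eq_of_length (by omega)
      · exact (h.eq_of_length (by omega)).symm
      · exact (h.eq_of_length (by omega)).symm
  · rw [if_neg (by omega), if_neg (by omega)]
    rw [tail_iff sx sy (le_of_lt hgt)]
    have hp : ¬ (sx.toList <+: sy.toList) := fun hc => by have := hc.length_le; omega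
    have hs : ¬ (sx.toList <:+ sy.toList) := fun hc => by have := hc.length_le; omega
    simp only [Bool.or_eq_true, decide_eq_true_eq]
    constructor
    · rintro (h | h)
      exacts [Or.inl h, Or.inr (Or.inl h)]
    · rintro (h | h | h | h)
      exacts [Or.inl h, Or.inr h, absurd h hp, absurd h hs]

-- the inner loop of A is an 'any' over wordList
theorem trimDictInner_eq (x : String) (acc : List String) (ws : List String) :
    trimDictInner x acc ws =
      if ws.any (fun y => strContains x y) then acc ++ [PySem.Str.strip x] else acc := by
  induction ws with
  | nil => simp [trimDictInner]
  | cons y ys ih =>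
    simp only [trimDictInner, List.any_cons]
    by_cases h : strContains x y = true <;> simp [h, ih]

-- membership in a fold of double Set.add
theorem mem_foldl_add2 (l : List Int) (f g : Int → String) (a : PySem.Set String) (s : String) :
    s ∈ l.foldl (fun a i => PySem.Set.add (PySem.Set.add a (f i)) (g i)) a ↔
      s ∈ a ∨ ∃ i ∈ l, s = f i ∨ s = g i := by
  induction l generalizing a with
  | nil => simp
  | cons i is ih =>
    rw [List.foldl_cons, ih]
    simp only [PySem.Set.mem_add]
    constructor
    · rintro (((h | h) | h) | ⟨j, hj, h⟩)
      · exact Or.inl h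
      · exact Or.inr ⟨i, List.mem_cons_self .., Or.inl h⟩
      · exact Or.inr ⟨i, List.mem_cons_self .., Or.inr h⟩
      · exact Or.inr ⟨j, List.mem_cons_of_mem _ hj, h⟩
    · rintro (h | ⟨j, hj, h⟩)
      · exact Or.inl (Or.inl (Or.inl h))
      · rcases List.mem_cons.mp hj with rfl | hj'
        · rcases h with h | h
          · exact Or.inl (Or.inl (Or.inr h))
          · exact Or.inl (Or.inr h)
        · exact Or.inr ⟨j, hj', h⟩

-- the slices at index i ∈ range(len+1) are exactly the prefixes and suffixes
theorem exists_range_slice_iff (lw s : String) :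
    (∃ i ∈ PySem.List.pyRange 0 ((lw.toList.length : Int) + 1),
        s = PySem.Str.slice lw none (some i) ∨ s = PySem.Str.slice lw (some i) none) ↔
      (s.toList <+: lw.toList ∨ s.toList <:+ lw.toList) := by
  constructor
  · rintro ⟨i, hi, h | h⟩ <;>
      rcases PySem.List.mem_pyRange_one.mp hi with ⟨h0, _⟩ <;>
      rw [← String.toList_inj, PySem.Str.toList_slice, PySem.Chars.slice_eq_listSlice] at h
    · rw [PySem.List.slice_to lw.toList h0] at h
      exact Or.inl (h ▸ List.take_prefix _ _)
    · rw [PySem.List.slice_from lw.toList h0] at h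
      exact Or.inr (h ▸ List.drop_suffix _ _)
  · rintro (h | h)
    · refine ⟨(s.toList.length : Int), PySem.List.mem_pyRange_one.mpr
        ⟨by omega, by have := h.length_le; omega⟩, Or.inl ?_⟩
      rw [← String.toList_inj, PySem.Str.toList_slice, PySem.Chars.slice_eq_listSlice,
        PySem.List.slice_to lw.toList (by omega)]
      simpa using List.prefix_iff_eq_take.mp h
    · refine ⟨((lw.toList.length - s.toList.length : Nat) : Int), PySem.List.mem_pyRange_one.mpr
        ⟨by omega, by omega⟩, Or.inr ?_⟩
      rw [← String.toList_inj, PySem.Str.toList_slice, PySem.Chars.slice_eq_listSlice,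
        PySem.List.slice_from lw.toList (by omega)]
      simpa using List.suffix_iff_eq_drop.mp h

theorem mem_affixAdd (a : PySem.Set String) (w s : String) :
    s ∈ affixAdd a w ↔
      s ∈ a ∨ s.toList <+: (PySem.Str.lower w).toList ∨ s.toList <:+ (PySem.Str.lower w).toList := by
  unfold affixAdd
  rw [mem_foldl_add2, PySem.Str.len_eq, ← exists_range_slice_iff (PySem.Str.lower w) s]

theorem mem_affixFold (wordList : List String) (a : PySem.Set String) (s : String) :
    s ∈ wordList.foldl affixAdd a ↔
      s ∈ a ∨ ∃ w ∈ wordList,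
        s.toList <+: (PySem.Str.lower w).toList ∨ s.toList <:+ (PySem.Str.lower w).toList := by
  induction wordList generalizing a with
  | nil => simp
  | cons w ws ih =>
    rw [List.foldl_cons, ih, mem_affixAdd]
    constructor
    · rintro ((h | h) | ⟨v, hv, h⟩)
      · exact Or.inl h
      · exact Or.inr ⟨w, List.mem_cons_self .., h⟩
      · exact Or.inr ⟨v, List.mem_cons_of_mem _ hv, h⟩
    · rintro (h | ⟨v, hv, h⟩)
      · exact Or.inl (Or.inl h)
      · rcases List.mem_cons.mp hv with rfl | hv'
        · exact Or.inl (Or.inr h)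
        · exact Or.inr ⟨v, hv', h⟩

theorem mem_wordsFold (wordList : List String) (a : PySem.Set String) (s : String) :
    s ∈ wordList.foldl (fun p w => PySem.Set.add p (PySem.Str.lower w)) a ↔
      s ∈ a ∨ ∃ w ∈ wordList, s = PySem.Str.lower w := by
  induction wordList generalizing a with
  | nil => simp
  | cons w ws ih =>
    rw [List.foldl_cons, ih]
    simp only [PySem.Set.mem_add]
    constructor
    · rintro ((h | h) | ⟨v, hv, h⟩)
      · exact Or.inl h
      · exact Or.inr ⟨w, List.mem_cons_self .., h⟩
      · exact Or.inr ⟨v, List.mem_cons_of_mem _ hv, h⟩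
    · rintro (h | ⟨v, hv, h⟩)
      · exact Or.inl (Or.inl h)
      · rcases List.mem_cons.mp hv with rfl | hv'
        · exact Or.inl (Or.inr h)
        · exact Or.inr ⟨v, hv', h⟩

-- B's per-word condition equals A's 'any strContains x' over wordList
theorem condB_eq (x : String) (wordList : List String) :
    (PySem.Set.contains (wordList.foldl affixAdd PySem.Set.empty) (PySem.Str.lower x) ||
       (PySem.List.pyRange 0 (PySem.Str.len (PySem.Str.lower x) + 1)).any
         (fun i =>
           PySem.Set.contains
             (wordList.foldl (fun p w => PySem.Set.add p (PySem.Str.lower w)) PySem.Set.empty)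
             (PySem.Str.slice (PySem.Str.lower x) none (some i)) ||
           PySem.Set.contains
             (wordList.foldl (fun p w => PySem.Set.add p (PySem.Str.lower w)) PySem.Set.empty)
             (PySem.Str.slice (PySem.Str.lower x) (some i) none)))
      = wordList.any (fun y => strContains x y) := by
  rw [Bool.eq_iff_iff]
  simp only [Bool.or_eq_true, List.any_eq_true, PySem.Set.contains_iff,
    mem_affixFold, mem_wordsFold, PySem.Set.empty, List.not_mem_nil, false_or,
    strContains_iff, PySem.Str.len_eq]
  constructor
  · rintro (⟨w, hw, h⟩ | ⟨i, hi, h⟩)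
    · exact ⟨w, hw, Or.inr (Or.inr h)⟩
    · rcases h with ⟨w, hw, hs⟩ | ⟨w, hw, hs⟩
      · -- lx[:i] is in words: that word is a prefix of lx
        rcases PySem.List.mem_pyRange_one.mp hi with ⟨h0, _⟩
        refine ⟨w, hw, Or.inl ?_⟩
        rw [← String.toList_inj, PySem.Str.toList_slice, PySem.Chars.slice_eq_listSlice,
          PySem.List.slice_to _ h0] at hs
        exact hs ▸ List.take_prefix _ _
      · rcases PySem.List.mem_pyRange_one.mp hi with ⟨h0, _⟩
        refine ⟨w, hw, Or.inr (Or.inl ?_)⟩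
        rw [← String.toList_inj, PySem.Str.toList_slice, PySem.Chars.slice_eq_listSlice,
          PySem.List.slice_from _ h0] at hs
        exact hs ▸ List.drop_suffix _ _
  · rintro ⟨w, hw, h | h | h | h⟩
    · -- lower w prefix of lx: index i = |lower w| hits it
      refine Or.inr ⟨((PySem.Str.lower w).toList.length : Int), PySem.List.mem_pyRange_one.mpr
        ⟨by omega, by have := h.length_le; omega⟩, Or.inl ⟨w, hw, ?_⟩⟩
      rw [← String.toList_inj, PySem.Str.toList_slice, PySem.Chars.slice_eq_listSlice,
        PySem.List.slice_to _ (by omega)]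
      simpa using (List.prefix_iff_eq_take.mp h).symm
    · refine Or.inr ⟨(((PySem.Str.lower x).toList.length - (PySem.Str.lower w).toList.length : Nat) : Int),
        PySem.List.mem_pyRange_one.mpr ⟨by omega, by omega⟩, Or.inr ⟨w, hw, ?_⟩⟩
      rw [← String.toList_inj, PySem.Str.toList_slice, PySem.Chars.slice_eq_listSlice,
        PySem.List.slice_from _ (by omega)]
      simpa using (List.suffix_iff_eq_drop.mp h).symm
    · exact Or.inl ⟨w, hw, Or.inl h⟩
    · exact Or.inl ⟨w, hw, Or.inr h⟩

-- ===== VERDICT (by name: the statement is the Claim_ definition above) =====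
theorem trimDict_spec : Claim_equal_trimDict := by
  intro dictionary wordList _
  show trimDict dictionary wordList = trimDict_alt dictionary wordList
  have hB : trimDict_alt dictionary wordList =
      dictionary.foldl (fun newDict x =>
        if PySem.Set.contains (wordList.foldl affixAdd PySem.Set.empty) (PySem.Str.lower x) ||
           (PySem.List.pyRange 0 (PySem.Str.len (PySem.Str.lower x) + 1)).any
             (fun i =>
               PySem.Set.contains
                 (wordList.foldl (fun p w => PySem.Set.add p (PySem.Str.lower w)) PySem.Set.empty)
                 (PySem.Str.slice (PySem.Str.lower x) none (some i)) ||
               PySem.Set.contains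
                 (wordList.foldl (fun p w => PySem.Set.add p (PySem.Str.lower w)) PySem.Set.empty)
                 (PySem.Str.slice (PySem.Str.lower x) (some i) none))
        then newDict ++ [PySem.Str.strip x] else newDict) [] := by
    show dictionary.foldl (fun newDict x =>
        if PySem.Set.contains
             (wordList.foldl (fun (p : PySem.Set String × PySem.Set String) w =>
                (affixAdd p.1 w, PySem.Set.add p.2 (PySem.Str.lower w)))
                (PySem.Set.empty, PySem.Set.empty)).1 (PySem.Str.lower x) ||
           (PySem.List.pyRange 0 (PySem.Str.len (PySem.Str.lower x) + 1)).any
             (fun i =>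
               PySem.Set.contains
                 (wordList.foldl (fun (p : PySem.Set String × PySem.Set String) w =>
                    (affixAdd p.1 w, PySem.Set.add p.2 (PySem.Str.lower w)))
                    (PySem.Set.empty, PySem.Set.empty)).2
                 (PySem.Str.slice (PySem.Str.lower x) none (some i)) ||
               PySem.Set.contains
                 (wordList.foldl (fun (p : PySem.Set String × PySem.Set String) w =>
                    (affixAdd p.1 w, PySem.Set.add p.2 (PySem.Str.lower w)))
                    (PySem.Set.empty, PySem.Set.empty)).2
                 (PySem.Str.slice (PySem.Str.lower x) (some i) none))
        then newDict ++ [PySem.Str.strip x] else newDict) [] = _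
    rw [PySem.List.foldl_prod_mk (f := affixAdd)
      (g := fun p w => PySem.Set.add p (PySem.Str.lower w))]
  rw [hB]
  unfold trimDict
  apply PySem.List.foldl_congr_mem
  intro acc x _
  rw [trimDictInner_eq, condB_eq]
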